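-- pv_equiv track=rewrite | github.com/hacker65536/aws-ssm-calendar-generator | src/ics_generator.py | _clean_ics_content
-- ===== SOURCE A (Python) =====
-- def _clean_ics_content(content: str) -> str:
--     """Clean ICS content by removing unwanted escape sequences.
--
--     Args:
--         content: Raw ICS content
--
--     Returns:
--         Cleaned ICS content
--     """
--     lines = content.split('\n')
--     cleaned_lines = []
--
--     for line in lines:
--         # Remove \n at the end of SUMMARY and DESCRIPTION lines
--         if line.startswith('SUMMARY:') and '\\n' in line:
--             line = line.replace('\\n', '')
--         elif line.startswith('DESCRIPTION:') and '\\n' in line: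
--             line = line.replace('\\n', '')
--         cleaned_lines.append(line)
--
--     return '\n'.join(cleaned_lines)
-- ===== SOURCE B (Python) =====
-- def _clean_ics_content(content: str) -> str:
--     """Single pass over the characters: at each line start decide whether the
--     line is a SUMMARY:/DESCRIPTION: line, and while inside such a line drop
--     every literal backslash-n pair; no split/join, no per-line replace."""
--     out = []
--     i = 0
--     n = len(content)
--     while i < n:
--         strip = content.startswith('SUMMARY:', i) or content.startswith('DESCRIPTION:', i)
--         while i < n and content[i] != '\n':
--             if strip and content[i] == '\\' and i + 1 < n and content[i + 1] == 'n':
--                 i += 2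
--             else:
--                 out.append(content[i])
--                 i += 1
--         if i < n:
--             out.append('\n')
--             i += 1
--     return ''.join(out)
-- ===== Notes on version B (the rewrite author's own statement) =====
-- stated objective: alternative
-- what changed: Replaces the split-into-lines / per-line startswith-and-replace / join pipeline with a single left-to-right character scan that detects SUMMARY or DESCRIPTION prefixes at each line start and drops escaped-newline pairs in place, building the output once.
import Mathlib
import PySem

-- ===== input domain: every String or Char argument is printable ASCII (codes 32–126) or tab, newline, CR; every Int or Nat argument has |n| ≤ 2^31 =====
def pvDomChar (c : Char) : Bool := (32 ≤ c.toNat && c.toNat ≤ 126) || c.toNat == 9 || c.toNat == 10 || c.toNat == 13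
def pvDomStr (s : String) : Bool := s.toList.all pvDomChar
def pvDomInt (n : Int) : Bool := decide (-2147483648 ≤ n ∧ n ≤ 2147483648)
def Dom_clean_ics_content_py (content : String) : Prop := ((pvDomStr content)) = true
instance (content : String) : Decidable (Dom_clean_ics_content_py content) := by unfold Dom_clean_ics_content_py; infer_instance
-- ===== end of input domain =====

-- B replaces A's split/per-line-replace/join with a single character scan (alternative decomposition, same cost).


-- ===== PORT A =====
-- per-line body of A's for-loop
def aCleanLine (line : List Char) : List Char :=
  if PySem.Chars.startswith line "SUMMARY:".toList && PySem.Chars.isIn "\\n".toList line then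
    PySem.Chars.replace line "\\n".toList []
  else if PySem.Chars.startswith line "DESCRIPTION:".toList && PySem.Chars.isIn "\\n".toList line then
    PySem.Chars.replace line "\\n".toList []
  else line

def clean_ics_content_py (content : String) : String :=
  let lines := PySem.Chars.splitOn content.toList "\n".toList
  let cleaned := lines.foldl (fun acc line => acc ++ [aCleanLine line]) []
  String.mk (PySem.Chars.join "\n".toList cleaned)

-- ===== PORT B =====
-- B: one pass over the characters; bStart is at a line start, bLine inside a line
mutual
def bStart (cs : List Char) : List Char :=
  bLine (PySem.Chars.startswith cs "SUMMARY:".toList || PySem.Chars.startswith cs "DESCRIPTION:".toList) cs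
termination_by 2 * cs.length + 1

def bLine (strip : Bool) (cs : List Char) : List Char :=
  match cs with
  | [] => []
  | c :: t =>
    if c = '\n' then '\n' :: bStart t
    else if strip && (c == '\\') && (t.head? == some 'n') then bLine strip t.tail
    else c :: bLine strip t
termination_by 2 * cs.length
decreasing_by
  all_goals first
    | (simp [List.length_cons]; omega)
    | (cases t <;> simp [List.length_cons] <;> omega)
end

def clean_ics_content_py_alt (content : String) : String :=
  String.mk (bStart content.toList)

-- ===== PRECONDITION & SPEC =====
def Spec_clean_ics_content_py (content : String) (out : String) : Prop := out = clean_ics_content_py_alt content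
instance (content : String) (out : String) : Decidable (Spec_clean_ics_content_py content out) := by unfold Spec_clean_ics_content_py; infer_instance

-- ===== CLAIM (what is proved, stated in full; the proofs are below) =====
def Claim_equal_clean_ics_content_py : Prop := ∀ (content : String), Dom_clean_ics_content_py content → Spec_clean_ics_content_py content (clean_ics_content_py content)

-- ===== LEMMAS AND PROOFS =====

-- the proofs go through a simple structural model of the computation:
-- `pvLines` = split on '\n'; `pvStrip` = remove every "\\n" pair left to right
def pvLines : List Char → List (List Char)
  | [] => [[]]
  | c :: t =>
    if c = '\n' then [] :: pvLines t
    else match pvLines t with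
      | [] => [[c]]
      | l :: ls => (c :: l) :: ls

def pvStrip : List Char → List Char
  | [] => []
  | c :: t =>
    if c = '\\' ∧ t.head? = some 'n' then pvStrip t.tail else c :: pvStrip t
termination_by cs => cs.length
decreasing_by
  all_goals cases t <;> simp [List.length_cons] <;> omega

def pvG (l : List Char) : List Char :=
  if PySem.Chars.startswith l "SUMMARY:".toList || PySem.Chars.startswith l "DESCRIPTION:".toList then pvStrip l else l

def pvJoinTail (ls : List (List Char)) : List Char := (ls.map (fun l => '\n' :: pvG l)).flatten

def pvChunk (strip : Bool) : List (List Char) → List Char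
  | [] => []
  | l :: ls => (if strip then pvStrip l else l) ++ pvJoinTail ls

theorem pvLines_ne_nil (cs : List Char) : pvLines cs ≠ [] := by
  cases cs with
  | nil => simp [pvLines]
  | cons c t =>
    simp only [pvLines]
    split
    · simp
    · cases h : pvLines t <;> simp

theorem pvStrip_cons_of_not (c : Char) (t : List Char)
    (h : ¬ (c = '\\' ∧ t.head? = some 'n')) : pvStrip (c :: t) = c :: pvStrip t := by
  rw [pvStrip, if_neg h]

theorem pvStrip_cons_pair (t : List Char) : pvStrip ('\\' :: 'n' :: t) = pvStrip t := by
  rw [pvStrip, if_pos ⟨rfl, rfl⟩]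
  rfl

theorem pvStrip_of_not_infix (l : List Char) (h : ¬ ("\\n".toList <:+: l)) : pvStrip l = l := by
  induction l with
  | nil => rw [pvStrip]
  | cons c t ih =>
    have hnot : ¬ (c = '\\' ∧ t.head? = some 'n') := by
      rintro ⟨rfl, hh⟩
      cases t with
      | nil => simp at hh
      | cons d t' =>
        simp at hh
        exact h ⟨[], t', by simp [hh]⟩
    rw [pvStrip_cons_of_not c t hnot, ih (fun hi => h (hi.trans (List.suffix_cons c t).isInfix))]

-- A's replace("\\n", "") is exactly pvStrip
theorem replace_go_eq_pvStrip (fuel : Nat) : ∀ (l acc : List Char), l.length ≤ fuel →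
    PySem.Chars.replace.go "\\n".toList [] fuel l acc = acc.reverse ++ pvStrip l := by
  induction fuel with
  | zero =>
    intro l acc h
    have : l = [] := List.eq_nil_of_length_eq_zero (Nat.le_zero.mp h)
    subst this
    simp [PySem.Chars.replace.go, pvStrip]
  | succ n ih =>
    intro l acc h
    match l with
    | [] => simp [PySem.Chars.replace.go, pvStrip]
    | c :: t =>
      rw [PySem.Chars.replace.go]
      by_cases hp : List.isPrefixOf "\\n".toList (c :: t)
      · simp only [hp, if_true]
        have hshape : c = '\\' ∧ ∃ t', t = 'n' :: t' := by
          have := List.isPrefixOf_iff_prefix.mp hp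
          obtain ⟨s, hs⟩ := this
          cases t with
          | nil =>
            have hlen := congrArg List.length hs
            rw [show ("\\n".toList ++ s).length = s.length + 2 by simp] at hlen
            simp at hlen
          | cons d t' =>
            simp at hs
            obtain ⟨h1, h2, _⟩ := hs
            exact ⟨h1.symm, t', by rw [h2]⟩
        obtain ⟨rfl, t', rfl⟩ := hshape
        have hlen : t'.length ≤ n := by simp at h; omega
        rw [show ("\\n".toList).length = 2 from rfl]
        simp only [List.drop_succ_cons, List.drop_zero, List.reverse_nil, List.nil_append]
        rw [ih t' acc hlen, pvStrip_cons_pair]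
      · simp only [hp]
        have hlen : t.length ≤ n := by simp only [List.length_cons] at h; omega
        rw [ih t (c :: acc) hlen]
        have hnot : ¬ (c = '\\' ∧ t.head? = some 'n') := by
          rintro ⟨rfl, hh⟩
          cases t with
          | nil => simp at hh
          | cons d t' =>
            simp at hh
            exact hp (by simp [List.isPrefixOf, hh])
        rw [pvStrip_cons_of_not c t hnot]
        simp

theorem replace_eq_pvStrip (l : List Char) :
    PySem.Chars.replace l "\\n".toList [] = pvStrip l := by
  rw [PySem.Chars.replace]
  simp only [List.isEmpty_iff]
  rw [if_neg (by simp)]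
  rw [replace_go_eq_pvStrip l.length l [] (le_refl _)]
  simp

theorem replace_eq_pvStrip' (l : List Char) :
    PySem.Chars.replace l ['\\', 'n'] [] = pvStrip l := replace_eq_pvStrip l

-- A's per-line cleaning is pvG
theorem aCleanLine_eq_pvG (l : List Char) : aCleanLine l = pvG l := by
  unfold aCleanLine pvG
  cases h3 : PySem.Chars.isIn "\\n".toList l with
  | true =>
    simp only [Bool.and_true]
    cases h1 : PySem.Chars.startswith l "SUMMARY:".toList <;>
    cases h2 : PySem.Chars.startswith l "DESCRIPTION:".toList <;>
      simp [replace_eq_pvStrip']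
  | false =>
    have hni : ¬ ("\\n".toList <:+: l) :=
      (PySem.Chars.isIn_eq_false_iff "\\n".toList l).mp h3
    have hs := pvStrip_of_not_infix l hni
    simp only [Bool.and_false]
    simp [hs]

-- A's splitOn '\n' is pvLines
def pvModFirst (p : List Char) : List (List Char) → List (List Char)
  | [] => [p]
  | l :: ls => (p ++ l) :: ls

theorem splitOn_go_eq_pvLines (fuel : Nat) : ∀ (l cur : List Char) (acc : List (List Char)),
    l.length < fuel →
    PySem.Chars.splitOn.go "\n".toList fuel l cur acc = acc.reverse ++ pvModFirst cur.reverse (pvLines l) := by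
  induction fuel with
  | zero => intro l cur acc h; omega
  | succ n ih =>
    intro l cur acc h
    match l with
    | [] => simp [PySem.Chars.splitOn.go, pvLines, pvModFirst]
    | c :: t =>
      rw [PySem.Chars.splitOn.go]
      by_cases hc : c = '\n'
      · subst hc
        rw [if_pos (by simp)]
        rw [show ("\n".toList).length = 1 from rfl]
        simp only [List.drop_succ_cons, List.drop_zero]
        rw [ih t [] (cur.reverse :: acc) (by simp at h; omega)]
        cases hl : pvLines t with
        | nil => exact absurd hl (pvLines_ne_nil t)
        | cons l0 ls => simp [pvLines, pvModFirst, hl]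
      · rw [if_neg (by simp; intro hh; exact hc hh.symm)]
        rw [ih t (c :: cur) acc (by simp at h; omega)]
        cases hl : pvLines t with
        | nil => exact absurd hl (pvLines_ne_nil t)
        | cons l0 ls => simp [pvLines, hc, pvModFirst, hl]

theorem splitOn_eq_pvLines (cs : List Char) :
    PySem.Chars.splitOn cs "\n".toList = pvLines cs := by
  rw [PySem.Chars.splitOn]
  rw [splitOn_go_eq_pvLines (cs.length + 1) cs [] [] (by omega)]
  cases hl : pvLines cs with
  | nil => exact absurd hl (pvLines_ne_nil cs)
  | cons l0 ls => simp [pvModFirst]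

-- a '\n'-free prefix of cs is a prefix of the first line of cs
theorem isPrefixOf_head_pvLines (p : List Char) (hp : '\n' ∉ p) : ∀ (cs : List Char),
    List.isPrefixOf p cs = List.isPrefixOf p ((pvLines cs).headD []) := by
  induction p with
  | nil => intro cs; simp [List.isPrefixOf]
  | cons q p' ih =>
    intro cs
    have hq : q ≠ '\n' := fun h => hp (by simp [h])
    have hp' : '\n' ∉ p' := fun h => hp (by simp [h])
    cases cs with
    | nil => simp [pvLines, List.isPrefixOf]
    | cons c t =>
      by_cases hc : c = '\n'
      · subst hc
        simp [pvLines, List.isPrefixOf, hq]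
      · cases hl : pvLines t with
        | nil => exact absurd hl (pvLines_ne_nil t)
        | cons l0 ls =>
          simp only [pvLines, hc, if_false, hl, List.isPrefixOf, List.headD_cons]
          rw [ih hp' t, hl]
          simp [List.isPrefixOf]

theorem startswith_head_pvLines (p : List Char) (hp : '\n' ∉ p) (cs : List Char) :
    PySem.Chars.startswith cs p = PySem.Chars.startswith ((pvLines cs).headD []) p := by
  have h1 := PySem.Chars.startswith_iff (s := cs) (p := p)
  have h2 := PySem.Chars.startswith_iff (s := (pvLines cs).headD []) (p := p)
  have h3 := isPrefixOf_head_pvLines p hp cs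
  rw [Bool.eq_iff_iff, h1, h2, ← List.isPrefixOf_iff_prefix, ← List.isPrefixOf_iff_prefix, h3]

-- join with '\n' unfolds to head ++ pvJoinTail
theorem intercalate_map_pvG (l : List Char) (ls : List (List Char)) :
    PySem.Chars.join "\n".toList ((l :: ls).map pvG) = pvG l ++ pvJoinTail ls := by
  induction ls generalizing l with
  | nil => simp [PySem.Chars.join, pvJoinTail, List.intercalate]
  | cons l2 ls ih =>
    have step : List.intercalate "\n".toList (pvG l :: pvG l2 :: ls.map pvG) =
        pvG l ++ "\n".toList ++ List.intercalate "\n".toList (pvG l2 :: ls.map pvG) := by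
      simp [List.intercalate]
    simp only [PySem.Chars.join, List.map_cons] at *
    rw [step, ih l2]
    simp [pvJoinTail, show "\n".toList = ['\n'] from rfl]

-- the main simultaneous invariant for B's two mutually recursive loops
theorem bMain (n : Nat) : ∀ (cs : List Char), cs.length ≤ n →
    (∀ strip, bLine strip cs = pvChunk strip (pvLines cs)) ∧
    (bStart cs = PySem.Chars.join "\n".toList ((pvLines cs).map pvG)) := by
  induction n with
  | zero =>
    intro cs h
    have : cs = [] := List.eq_nil_of_length_eq_zero (Nat.le_zero.mp h)
    subst this
    constructor
    · intro strip
      simp [bLine, pvLines, pvChunk, pvJoinTail, pvStrip]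
    · rw [bStart, bLine]
      simp [pvLines, pvG, PySem.Chars.join, List.intercalate, pvStrip]
  | succ n ih =>
    intro cs h
    have hQ : ∀ strip, bLine strip cs = pvChunk strip (pvLines cs) := by
      intro strip
      match cs with
      | [] => simp [bLine, pvLines, pvChunk, pvJoinTail, pvStrip]
      | c :: t =>
        rw [bLine]
        by_cases hc : c = '\n'
        · subst hc
          rw [if_pos rfl]
          have hP := (ih t (by simp at h; omega)).2
          rw [hP]
          cases hl : pvLines t with
          | nil => exact absurd hl (pvLines_ne_nil t)
          | cons l0 ls =>
            rw [intercalate_map_pvG]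
            simp [pvLines, hl, pvChunk, pvJoinTail, pvStrip]
        · rw [if_neg hc]
          by_cases hs : (strip && (c == '\\') && (t.head? == some 'n')) = true
          · rw [if_pos hs]
            simp only [Bool.and_eq_true, beq_iff_eq] at hs
            obtain ⟨⟨hstrip, rfl⟩, hh⟩ := hs
            cases t with
            | nil => simp at hh
            | cons d t' =>
              simp at hh
              subst hh
              subst hstrip
              have hQ' := ((ih t' (by simp at h; omega)).1 true)
              simp only [List.tail_cons]
              rw [hQ']
              cases hl : pvLines t' with
              | nil => exact absurd hl (pvLines_ne_nil t')
              | cons l0 ls =>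
                have h3 : pvLines ('\\' :: 'n' :: t') = ('\\' :: 'n' :: l0) :: ls := by
                  simp [pvLines, hl]
                rw [h3]
                simp [pvChunk, pvStrip]
          · rw [if_neg hs]
            have hQ' := ((ih t (by simp at h; omega)).1 strip)
            rw [hQ']
            cases hl : pvLines t with
            | nil => exact absurd hl (pvLines_ne_nil t)
            | cons l0 ls =>
              have h2 : pvLines (c :: t) = (c :: l0) :: ls := by simp [pvLines, hc, hl]
              rw [h2]
              cases strip with
              | false => simp [pvChunk]
              | true =>
                simp only [pvChunk]
                have hnot : ¬ (c = '\\' ∧ l0.head? = some 'n') := by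
                  rintro ⟨rfl, hh⟩
                  apply hs
                  suffices hsuf : t.head? = some 'n' by simp [hsuf]
                  cases t with
                  | nil =>
                    have heq := hl.symm.trans (show pvLines ([] : List Char) = [[]] by simp [pvLines])
                    have hl0 : l0 = [] := by injection heq
                    rw [hl0] at hh
                    simp at hh
                  | cons d t' =>
                    by_cases hd : d = '\n'
                    · subst hd
                      have hthis : pvLines ('\n' :: t') = [] :: pvLines t' := by simp [pvLines]
                      have heq := hl.symm.trans hthis
                      have hl0 : l0 = [] := by injection heq
                      rw [hl0] at hh
                      simp at hh
                    · cases hl2 : pvLines t' with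
                      | nil => exact absurd hl2 (pvLines_ne_nil t')
                      | cons m ms =>
                        have hthis : pvLines (d :: t') = (d :: m) :: ms := by simp [pvLines, hd, hl2]
                        have heq := hl.symm.trans hthis
                        have hl0 : l0 = d :: m := by injection heq
                        rw [hl0] at hh
                        simp at hh
                        simp [hh]
                rw [pvStrip_cons_of_not c l0 hnot]
                simp
    refine ⟨hQ, ?_⟩
    rw [bStart, hQ]
    cases hl : pvLines cs with
    | nil => exact absurd hl (pvLines_ne_nil cs)
    | cons l0 ls =>
      rw [intercalate_map_pvG]
      have e1 := startswith_head_pvLines "SUMMARY:".toList (by decide) cs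
      have e2 := startswith_head_pvLines "DESCRIPTION:".toList (by decide) cs
      rw [hl] at e1 e2
      simp only [List.headD_cons] at e1 e2
      simp only [pvChunk, pvG, e1, e2]

-- ===== VERDICT (by name: the statement is the Claim_ definition above) =====
theorem clean_ics_content_py_spec : Claim_equal_clean_ics_content_py := by
  intro content _
  unfold Spec_clean_ics_content_py clean_ics_content_py clean_ics_content_py_alt
  simp only [PySem.List.foldl_append_singleton_eq_map]
  rw [splitOn_eq_pvLines]
  have hmap : (pvLines content.toList).map aCleanLine = (pvLines content.toList).map pvG :=
    List.map_congr_left (fun l _ => aCleanLine_eq_pvG l)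
  rw [hmap, ((bMain content.toList.length content.toList (le_refl _)).2)]
  simp
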